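-- pv_equiv track=rewrite | github.com/KoStard/HermesCLI | src/hermes/utils/commands_extractor.py | extract_commands
-- ===== SOURCE A (Python) =====
-- def extract_commands(source: str, commands_set: set[str], default_command: str = '/prompt') -> list[tuple[str, str]]:
--     """
--     Input example:
--     some input
--     text
--     /command1 arg1 arg2
--     some other input text
--     /command2 arg1 /command3 arg2
--     another input text
--
--     Output:
--     [
--         ('/prompt', 'some input text'),
--         ('/command1', 'arg1 arg2'),
--         ('/prompt', 'some other input text'),
--         ('/command2', 'arg1'),
--         ('/command3', 'arg2'),
--         ('/prompt', 'another input text')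
--     ]
--     """
--     result = []
--     lines = source.split('\n')
--     current_command = None
--     current_args = []
--
--     for line in lines:
--         line = line.strip()
--         words = line.split()
--         # If the line is not empty, but it doesn't start with a command, then if there is ongoing command, close it, and use default command
--         if words and not (words[0].startswith('/') and words[0][1:] in commands_set):
--             if current_command:
--                 if current_command != default_command:
--                     result.append((current_command, ' '.join(current_args)))
--                     current_args = []
--                 else:
--                     # If the current command is the default command, add a new line to show the input structure
--                     current_args.append('\n')
--
--             current_command = default_command
--         # Process it word by word
--         for word in words:
--             if word.startswith('/') and word[1:] in commands_set:
--                 if current_command: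
--                     result.append((current_command, ' '.join(current_args)))
--                     current_args = []
--                 current_command = word
--             else:
--                 current_args.append(word)
--
--     if current_command:
--         result.append((current_command, ' '.join(current_args)))
--
--     return result
-- ===== SOURCE B (Python) =====
-- def extract_commands(source: str, commands_set: set[str], default_command: str = '/prompt') -> list[tuple[str, str]]:
--     def is_cmd(w):
--         return w.startswith('/') and w[1:] in commands_set
--
--     result = []
--     cur = None
--     args = []
--     for line in source.split('\n'):
--         words = line.strip().split()
--         if not words:
--             continue
--         # leading run of plain-text words (possibly the whole line)
--         k = 0
--         while k < len(words) and not is_cmd(words[k]):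
--             k += 1
--         if k > 0:
--             if cur:
--                 if cur != default_command:
--                     result.append((cur, ' '.join(args)))
--                     args = []
--                 else:
--                     args.append('\n')
--             cur = default_command
--             args = args + words[:k]
--         # the remainder is a sequence of command segments: a command word
--         # followed by its argument words, up to the next command word
--         rest = words[k:]
--         while rest:
--             j = 1
--             while j < len(rest) and not is_cmd(rest[j]):
--                 j += 1
--             if cur:
--                 result.append((cur, ' '.join(args)))
--                 args = []
--             cur = rest[0]
--             args = args + rest[1:j]
--             rest = rest[j:]
--     if cur:
--         result.append((cur, ' '.join(args)))
--     return result
-- ===== Notes on version B (the rewrite author's own statement) =====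
-- stated objective: alternative
-- what changed: A scans every line word-by-word with branch logic inside one flat loop; B segments each line structurally into a leading plain-text run (takewhile) plus command segments found by scanning ahead to the next command word, folding those segments into the carried (current_command, args) state.
import Mathlib
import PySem

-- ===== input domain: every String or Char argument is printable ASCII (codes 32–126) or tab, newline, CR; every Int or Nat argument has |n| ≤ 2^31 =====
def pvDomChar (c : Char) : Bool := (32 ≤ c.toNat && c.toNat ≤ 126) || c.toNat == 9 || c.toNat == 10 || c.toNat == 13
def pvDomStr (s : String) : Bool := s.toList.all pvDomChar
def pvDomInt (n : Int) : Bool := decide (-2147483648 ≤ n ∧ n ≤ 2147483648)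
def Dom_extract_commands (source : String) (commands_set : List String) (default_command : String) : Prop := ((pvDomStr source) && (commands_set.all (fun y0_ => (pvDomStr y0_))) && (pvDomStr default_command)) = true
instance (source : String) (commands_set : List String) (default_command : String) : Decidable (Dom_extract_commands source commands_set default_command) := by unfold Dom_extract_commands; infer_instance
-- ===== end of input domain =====

-- B re-implements A's flat word-by-word scan as a per-line segmentation pass
-- (leading text run, then command segments found by scanning to the next
-- command word); same return value, objective: alternative decomposition.

-- Python truthiness of 'current_command' (None or '' is falsy)
def pvTru (c : Option String) : Bool :=
  match c with
  | none => false
  | some s => decide (s ≠ "")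

-- state: (result, current_command, current_args)
-- ===== PORT A =====
def ecStepA (commands_set : List String) (st : List (String × String) × Option String × List String)
    (w : String) : List (String × String) × Option String × List String :=
  let (res, cur, args) := st
  if PySem.Str.startswith w "/" && commands_set.contains (PySem.Str.slice w (some 1) none) then
    if pvTru cur then (res ++ [(cur.getD "", PySem.Str.join " " args)], some w, [])
    else (res, some w, args)
  else (res, cur, args ++ [w])

def ecLineA (commands_set : List String) (default_command : String)
    (st : List (String × String) × Option String × List String) (line : String) :
    List (String × String) × Option String × List String :=
  let line := PySem.Str.strip line
  let words := PySem.Str.split₀ line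
  let st :=
    -- 'if words and not (words[0].startswith('/') and words[0][1:] in commands_set):'
    if words.head?.elim false
        (fun w0 => !(PySem.Str.startswith w0 "/" && commands_set.contains (PySem.Str.slice w0 (some 1) none))) then
      let (res, cur, args) := st
      if pvTru cur then
        if cur.getD "" ≠ default_command then
          (res ++ [(cur.getD "", PySem.Str.join " " args)], some default_command, [])
        else (res, some default_command, args ++ ["\n"])
      else (res, some default_command, args)
    else st
  words.foldl (ecStepA commands_set) st

def extract_commands (source : String) (commands_set : List String) (default_command : String) :
    List (String × String) :=
  let lines := (PySem.Str.split? source "\n").getD []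
  let st := lines.foldl (ecLineA commands_set default_command) ([], none, [])
  let (res, cur, args) := st
  if pvTru cur then res ++ [(cur.getD "", PySem.Str.join " " args)] else res

-- ===== PORT B =====
def ecIsCmd (commands_set : List String) (w : String) : Bool :=
  PySem.Str.startswith w "/" && commands_set.contains (PySem.Str.slice w (some 1) none)

-- 'while rest: j = scan to next command; flush; cur = rest[0]; args += rest[1:j]; rest = rest[j:]'
def ecSegs (commands_set : List String) (st : List (String × String) × Option String × List String) :
    List String → List (String × String) × Option String × List String
  | [] => st
  | c :: t =>
    let buf := t.takeWhile (fun w => !ecIsCmd commands_set w)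
    let rest' := t.dropWhile (fun w => !ecIsCmd commands_set w)
    let (res, cur, args) := st
    let st' :=
      if pvTru cur then (res ++ [(cur.getD "", PySem.Str.join " " args)], some c, ([] : List String) ++ buf)
      else (res, some c, args ++ buf)
    ecSegs commands_set st' rest'
termination_by rest => rest.length
decreasing_by
  exact Nat.lt_succ_of_le ((List.dropWhile_sublist _).length_le)

def ecLineB (commands_set : List String) (default_command : String)
    (st : List (String × String) × Option String × List String) (line : String) :
    List (String × String) × Option String × List String :=
  let words := PySem.Str.split₀ (PySem.Str.strip line)
  let pre := words.takeWhile (fun w => !ecIsCmd commands_set w)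
  let rest := words.dropWhile (fun w => !ecIsCmd commands_set w)
  let st :=
    if pre.isEmpty then st
    else
      let (res, cur, args) := st
      let (res, args) :=
        if pvTru cur then
          if cur.getD "" ≠ default_command then
            (res ++ [(cur.getD "", PySem.Str.join " " args)], ([] : List String))
          else (res, args ++ ["\n"])
        else (res, args)
      (res, some default_command, args ++ pre)
  ecSegs commands_set st rest

def extract_commands_alt (source : String) (commands_set : List String) (default_command : String) :
    List (String × String) :=
  let lines := (PySem.Str.split? source "\n").getD []
  let st := lines.foldl (ecLineB commands_set default_command) ([], none, [])
  let (res, cur, args) := st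
  if pvTru cur then res ++ [(cur.getD "", PySem.Str.join " " args)] else res

-- ===== PRECONDITION & SPEC =====
def Spec_extract_commands (source : String) (commands_set : List String) (default_command : String) (out : List (String × String)) : Prop := out = extract_commands_alt source commands_set default_command
instance (source : String) (commands_set : List String) (default_command : String) (out : List (String × String)) : Decidable (Spec_extract_commands source commands_set default_command out) := by unfold Spec_extract_commands; infer_instance

-- ===== CLAIM (what is proved, stated in full; the proofs are below) =====
def Claim_equal_extract_commands : Prop := ∀ (source : String) (commands_set : List String) (default_command : String), Dom_extract_commands source commands_set default_command → Spec_extract_commands source commands_set default_command (extract_commands source commands_set default_command)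

-- ===== LEMMAS AND PROOFS =====

-- a run of non-command words only extends current_args
theorem ecFoldA_text (cs : List String) (buf : List String)
    (h : ∀ w ∈ buf, ecIsCmd cs w = false) :
    ∀ st : List (String × String) × Option String × List String,
      buf.foldl (ecStepA cs) st = (st.1, st.2.1, st.2.2 ++ buf) := by
  induction buf with
  | nil => intro st; simp
  | cons w t ih =>
    intro ⟨res, cur, args⟩
    have hw : ecIsCmd cs w = false := h w (by simp)
    have hw' : (PySem.Str.startswith w "/" && cs.contains (PySem.Str.slice w (some 1) none)) = false := hw
    simp only [List.foldl_cons, ecStepA, hw', Bool.false_eq_true, if_false]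
    rw [ih (fun x hx => h x (by simp [hx]))]
    simp

-- A's word loop equals B's segment loop when the list starts with a command word (or is empty)
theorem ecFoldA_segs (cs : List String) : ∀ (n : Nat) (rest : List String)
    (st : List (String × String) × Option String × List String),
    rest.length ≤ n →
    (∀ c, rest.head? = some c → ecIsCmd cs c = true) →
    rest.foldl (ecStepA cs) st = ecSegs cs st rest := by
  intro n
  induction n with
  | zero =>
    intro rest st hlen _
    have : rest = [] := List.eq_nil_of_length_eq_zero (Nat.le_zero.mp hlen)
    subst this; simp [ecSegs]
  | succ n ih =>
    intro rest st hlen hhd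
    match rest with
    | [] => simp [ecSegs]
    | c :: t =>
      obtain ⟨res, cur, args⟩ := st
      have hc : ecIsCmd cs c = true := hhd c rfl
      have hc' : (PySem.Str.startswith c "/" && cs.contains (PySem.Str.slice c (some 1) none)) = true := hc
      rw [ecSegs]
      simp only [List.foldl_cons, ecStepA, hc', if_true]
      set p : String → Bool := fun w => !ecIsCmd cs w with hp
      have hsplit : t.takeWhile p ++ t.dropWhile p = t := List.takeWhile_append_dropWhile
      have hbuf : ∀ w ∈ t.takeWhile p, ecIsCmd cs w = false := by
        intro w hw
        have := List.all_takeWhile (p := p) (l := t)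
        have hpw : p w = true := by
          have : (t.takeWhile p).all p = true := List.all_takeWhile
          exact (List.all_eq_true.mp this) w hw
        simpa [hp] using hpw
      have hhd' : ∀ c', (t.dropWhile p).head? = some c' → ecIsCmd cs c' = true := by
        intro c' h
        have := List.head?_dropWhile_not (p := p) (l := t)
        rw [h] at this
        simpa [hp] using this
      have hlen' : (t.dropWhile p).length ≤ n := by
        have h1 : (t.dropWhile p).length ≤ t.length := (List.dropWhile_sublist _).length_le
        have h2 : t.length ≤ n := by simpa using Nat.le_of_succ_le_succ hlen
        omega
      cases hcur : pvTru cur with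
      | false =>
        simp only [Bool.false_eq_true, if_false]
        calc (t.foldl (ecStepA cs) (res, some c, args))
            = ((t.takeWhile p ++ t.dropWhile p).foldl (ecStepA cs) (res, some c, args)) := by rw [hsplit]
          _ = ((t.dropWhile p).foldl (ecStepA cs) (res, some c, args ++ t.takeWhile p)) := by
                rw [List.foldl_append, ecFoldA_text cs _ hbuf]
          _ = ecSegs cs (res, some c, args ++ t.takeWhile p) (t.dropWhile p) := ih _ _ hlen' hhd'
      | true =>
        simp only [if_true]
        calc (t.foldl (ecStepA cs) (res ++ [(cur.getD "", PySem.Str.join " " args)], some c, []))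
            = ((t.takeWhile p ++ t.dropWhile p).foldl (ecStepA cs)
                (res ++ [(cur.getD "", PySem.Str.join " " args)], some c, [])) := by rw [hsplit]
          _ = ((t.dropWhile p).foldl (ecStepA cs)
                (res ++ [(cur.getD "", PySem.Str.join " " args)], some c, [] ++ t.takeWhile p)) := by
                rw [List.foldl_append, ecFoldA_text cs _ hbuf]
          _ = ecSegs cs (res ++ [(cur.getD "", PySem.Str.join " " args)], some c, [] ++ t.takeWhile p)
                (t.dropWhile p) := ih _ _ hlen' hhd'

-- the two per-line passes agree
set_option maxHeartbeats 1000000 in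
theorem ecLine_eq (cs : List String) (dc : String)
    (st : List (String × String) × Option String × List String) (line : String) :
    ecLineA cs dc st line = ecLineB cs dc st line := by
  obtain ⟨res, cur, args⟩ := st
  simp only [ecLineA, ecLineB]
  generalize PySem.Str.split₀ (PySem.Str.strip line) = words
  set p : String → Bool := fun w => !ecIsCmd cs w with hp
  have hsplit : words.takeWhile p ++ words.dropWhile p = words := List.takeWhile_append_dropWhile
  have hbuf : ∀ w ∈ words.takeWhile p, ecIsCmd cs w = false := by
    intro w hw
    have : (words.takeWhile p).all p = true := List.all_takeWhile
    have hpw : p w = true := (List.all_eq_true.mp this) w hw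
    simpa [hp] using hpw
  have hhd' : ∀ c', (words.dropWhile p).head? = some c' → ecIsCmd cs c' = true := by
    intro c' h
    have := List.head?_dropWhile_not (p := p) (l := words)
    rw [h] at this
    simpa [hp] using this
  cases hpre : words.takeWhile p with
  | nil =>
    -- line is empty or starts with a command word
    have hdrop : words.dropWhile p = words := by
      conv_rhs => rw [← hsplit]
      rw [hpre, List.nil_append]
    have hguard : (words.head?.elim false
        (fun w0 => !(PySem.Str.startswith w0 "/" && cs.contains (PySem.Str.slice w0 (some 1) none)))) = false := by
      cases hw : words with
      | nil => rfl
      | cons w0 tl =>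
        have hcmd : ecIsCmd cs w0 = true := hhd' w0 (by rw [hdrop, hw]; rfl)
        simp only [List.head?_cons, Option.elim_some]
        rw [show (PySem.Str.startswith w0 "/" && cs.contains (PySem.Str.slice w0 (some 1) none)) = true from hcmd]
        rfl
    rw [hguard, hdrop]
    simp only [Bool.false_eq_true, if_false, List.isEmpty_nil, if_true]
    exact ecFoldA_segs cs words.length words _ le_rfl (hdrop ▸ hhd')
  | cons w0 tl =>
    -- line starts with at least one plain-text word
    have hbufc : ∀ w ∈ w0 :: tl, ecIsCmd cs w = false := fun w hw => hbuf w (hpre ▸ hw)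
    have hsplit' : words = (w0 :: tl) ++ words.dropWhile p := by
      conv_lhs => rw [← hsplit]
      rw [hpre]
    have hhead : words.head? = some w0 := by rw [hsplit']; rfl
    have hguard : (words.head?.elim false
        (fun w0 => !(PySem.Str.startswith w0 "/" && cs.contains (PySem.Str.slice w0 (some 1) none)))) = true := by
      rw [hhead]
      simp only [Option.elim_some]
      rw [show (PySem.Str.startswith w0 "/" && cs.contains (PySem.Str.slice w0 (some 1) none)) = false
        from hbufc w0 (by simp)]
      rfl
    rw [hguard]
    simp only [if_true, List.isEmpty_cons, Bool.false_eq_true, if_false]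
    conv_lhs => rw [hsplit']
    rw [List.foldl_append]
    cases hcur : pvTru cur with
    | false =>
      simp only [Bool.false_eq_true, if_false]
      rw [ecFoldA_text cs (w0 :: tl) hbufc (res, some dc, args)]
      exact ecFoldA_segs cs _ _ _ le_rfl hhd'
    | true =>
      simp only [if_true]
      by_cases hne : cur.getD "" ≠ dc
      · simp only [if_pos hne]
        rw [ecFoldA_text cs (w0 :: tl) hbufc (res ++ [(cur.getD "", PySem.Str.join " " args)], some dc, [])]
        exact ecFoldA_segs cs _ _ _ le_rfl hhd'
      · simp only [if_neg hne]
        rw [ecFoldA_text cs (w0 :: tl) hbufc (res, some dc, args ++ ["\n"])]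
        exact ecFoldA_segs cs _ _ _ le_rfl hhd'

-- ===== VERDICT (by name: the statement is the Claim_ definition above) =====
theorem extract_commands_spec : Claim_equal_extract_commands := by
  intro source cs dc _
  unfold Spec_extract_commands
  have h : (((PySem.Str.split? source "\n").getD []) : List String).foldl (ecLineA cs dc) ([], none, []) =
      ((PySem.Str.split? source "\n").getD []).foldl (ecLineB cs dc) ([], none, []) := by
    congr 1
    funext st line
    exact ecLine_eq cs dc st line
  simp only [extract_commands, extract_commands_alt, h]
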